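-- pv_equiv track=rewrite | github.com/i227433/reconnaissance-tool | utils/network.py | is_cloud_ip
-- ===== SOURCE A (Python) =====
-- def is_cloud_ip(ip: str) -> bool:
--     """
--     Check if an IP address belongs to a cloud provider (basic check).
--
--     Args:
--         ip (str): IP address
--
--     Returns:
--         bool: True if likely cloud IP
--     """
--     # This is a basic implementation - in practice, you'd want
--     # to use a comprehensive database of cloud IP ranges
--     cloud_ranges = [
--         ('3.', 'Amazon AWS'),
--         ('13.', 'Amazon AWS'),
--         ('15.', 'Amazon AWS'),
--         ('18.', 'Amazon AWS'),
--         ('34.', 'Google Cloud'),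
--         ('35.', 'Google Cloud'),
--         ('104.', 'Microsoft Azure'),
--         ('137.', 'Microsoft Azure'),
--         ('138.', 'Microsoft Azure'),
--         ('139.', 'Microsoft Azure'),
--         ('40.', 'Microsoft Azure'),
--         ('52.', 'Microsoft Azure'),
--     ]
--
--     for prefix, provider in cloud_ranges:
--         if ip.startswith(prefix):
--             return True
--
--     return False
-- ===== SOURCE B (Python) =====
-- def is_cloud_ip(ip: str) -> bool:
--     """
--     Check if an IP address belongs to a cloud provider (basic check).
--
--     Hand-compiled character decision tree (trie/DFA over the first four
--     characters) instead of scanning a list of prefixes.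
--     """
--     def ch(i):
--         return ip[i] if i < len(ip) else ''
--     c0, c1, c2, c3 = ch(0), ch(1), ch(2), ch(3)
--     if c0 == '3':
--         return c1 == '.' or ((c1 == '4' or c1 == '5') and c2 == '.')
--     if c0 == '1':
--         if c1 == '3':
--             return c2 == '.' or ((c2 == '7' or c2 == '8' or c2 == '9') and c3 == '.')
--         if c1 == '5' or c1 == '8':
--             return c2 == '.'
--         if c1 == '0':
--             return c2 == '4' and c3 == '.'
--         return False
--     if c0 == '4':
--         return c1 == '0' and c2 == '.'
--     if c0 == '5':
--         return c1 == '2' and c2 == '.'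
--     return False
-- ===== Notes on version B (the rewrite author's own statement) =====
-- stated objective: alternative
-- what changed: Replaces the data-driven loop over a 12-entry prefix/provider list with repeated startswith calls by a hand-compiled trie/DFA: a branching decision tree on the first four characters of the string, with no prefix table and no string scanning at all.
import Mathlib
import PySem

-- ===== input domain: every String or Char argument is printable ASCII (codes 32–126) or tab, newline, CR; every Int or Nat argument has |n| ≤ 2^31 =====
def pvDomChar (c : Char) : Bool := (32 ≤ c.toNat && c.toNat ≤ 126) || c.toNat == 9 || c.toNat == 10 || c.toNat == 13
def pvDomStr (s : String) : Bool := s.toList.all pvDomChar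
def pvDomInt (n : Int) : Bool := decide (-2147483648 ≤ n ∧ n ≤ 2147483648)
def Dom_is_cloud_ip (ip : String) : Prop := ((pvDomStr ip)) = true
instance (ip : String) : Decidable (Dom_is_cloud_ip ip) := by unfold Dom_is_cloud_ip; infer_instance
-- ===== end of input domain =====

-- B replaces A's 12-iteration startswith scan over a prefix/provider list by a
-- hand-compiled character decision tree (a trie/DFA over the first four characters)
-- (objective: alternative).


-- ===== PORT A =====
def cloudRanges : List (String × String) :=
  [("3.", "Amazon AWS"), ("13.", "Amazon AWS"), ("15.", "Amazon AWS"), ("18.", "Amazon AWS"),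
   ("34.", "Google Cloud"), ("35.", "Google Cloud"),
   ("104.", "Microsoft Azure"), ("137.", "Microsoft Azure"), ("138.", "Microsoft Azure"),
   ("139.", "Microsoft Azure"), ("40.", "Microsoft Azure"), ("52.", "Microsoft Azure")]

-- the 'for prefix, provider in cloud_ranges' loop with early return
def cloudLoop (ranges : List (String × String)) (ip : String) : Bool :=
  match ranges with
  | [] => false
  | (pfx, _) :: rest => if PySem.Str.startswith ip pfx then true else cloudLoop rest ip

def is_cloud_ip (ip : String) : Bool := cloudLoop cloudRanges ip

-- ===== PORT B =====
-- ch(i) = ip[i] if i < len(ip) else '' — the out-of-range sentinel '' is modelled as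
-- none (exact: Python's '' compares unequal to every one-character string used below)
def chAt (l : List Char) (i : Nat) : Option Char := l[i]?

def is_cloud_ip_alt (ip : String) : Bool :=
  let l := ip.toList
  let c0 := chAt l 0
  let c1 := chAt l 1
  let c2 := chAt l 2
  let c3 := chAt l 3
  if c0 = some '3' then
    c1 = some '.' || ((c1 = some '4' || c1 = some '5') && c2 = some '.')
  else if c0 = some '1' then
    if c1 = some '3' then
      c2 = some '.' || ((c2 = some '7' || c2 = some '8' || c2 = some '9') && c3 = some '.')
    else if c1 = some '5' || c1 = some '8' then
      c2 = some '.'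
    else if c1 = some '0' then
      c2 = some '4' && c3 = some '.'
    else false
  else if c0 = some '4' then
    c1 = some '0' && c2 = some '.'
  else if c0 = some '5' then
    c1 = some '2' && c2 = some '.'
  else false

-- ===== PRECONDITION & SPEC =====
def Spec_is_cloud_ip (ip : String) (out : Bool) : Prop := out = is_cloud_ip_alt ip
instance (ip : String) (out : Bool) : Decidable (Spec_is_cloud_ip ip out) := by unfold Spec_is_cloud_ip; infer_instance

-- ===== CLAIM (what is proved, stated in full; the proofs are below) =====
def Claim_equal_is_cloud_ip : Prop := ∀ (ip : String), Dom_is_cloud_ip ip → Spec_is_cloud_ip ip (is_cloud_ip ip)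

-- ===== LEMMAS AND PROOFS =====

-- both programs look only at the first four characters; case analysis there
theorem main_eq (l : List Char) :
    cloudLoop cloudRanges (String.ofList l) = is_cloud_ip_alt (String.ofList l) := by
  rcases l with _ | ⟨a, _ | ⟨b, _ | ⟨c, _ | ⟨d, t⟩⟩⟩⟩ <;>
    simp only [cloudLoop, cloudRanges, is_cloud_ip_alt, chAt, PySem.Str.startswith_eq,
      String.toList_ofList, List.getElem?_cons_zero,
      List.getElem?_cons_succ, List.getElem?_nil] <;>
    simp [PySem.Chars.startswith]
  · simp [@eq_comm Char]
  · split_ifs <;> (try (rename_i h; rcases h with rfl | rfl)) <;>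
      simp_all [Bool.and_or_distrib_right, @eq_comm Char]
  · split_ifs <;> (try (rename_i h; rcases h with rfl | rfl)) <;>
      simp_all [Bool.and_or_distrib_right, Bool.or_assoc, @eq_comm Char]

-- ===== VERDICT (by name: the statement is the Claim_ definition above) =====
theorem is_cloud_ip_spec : Claim_equal_is_cloud_ip := by
  intro ip _
  unfold Spec_is_cloud_ip is_cloud_ip
  have h := main_eq ip.toList
  simpa [String.ofList_toList] using h
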